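-- pv_equiv track=rewrite | github.com/ofrimasad/translated_qa | src/matcher/smart_match.py | _sub_sentence
-- ===== SOURCE A (Python) =====
-- def _sub_sentence(sentence: str, n: int):
--     sentence_list = sentence.split(' ')
--     results = []
--
--     for start in range(n):
--         next = start
--         for _ in range((len(sentence_list) - start) // n):
--             results.append(" ".join(sentence_list[next: next + n]))
--             next += n
--
--     return results
-- ===== SOURCE B (Python) =====
-- def _sub_sentence(sentence: str, n: int):
--     # Group-by: one pass over every valid window offset, bucketing the joined
--     # window by offset % n, then flattening the buckets (dict insertion order
--     # is residue 0,1,2,... since offsets are visited in increasing order).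
--     words = sentence.split(' ')
--     if n <= 0:
--         return []
--     buckets = {}
--     for j in range(len(words) - n + 1):
--         buckets.setdefault(j % n, []).append(" ".join(words[j:j + n]))
--     return [chunk for bucket in buckets.values() for chunk in bucket]
-- ===== Notes on version B (the rewrite author's own statement) =====
-- stated objective: faster
-- what changed: A's n phase passes with an integer cursor are replaced by a group-by: one pass over all valid window offsets j bucketing the joined window into a dict keyed by j % n, then flattening the buckets in dict insertion order (residue 0,1,2,... since offsets increase).
import Mathlib
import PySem

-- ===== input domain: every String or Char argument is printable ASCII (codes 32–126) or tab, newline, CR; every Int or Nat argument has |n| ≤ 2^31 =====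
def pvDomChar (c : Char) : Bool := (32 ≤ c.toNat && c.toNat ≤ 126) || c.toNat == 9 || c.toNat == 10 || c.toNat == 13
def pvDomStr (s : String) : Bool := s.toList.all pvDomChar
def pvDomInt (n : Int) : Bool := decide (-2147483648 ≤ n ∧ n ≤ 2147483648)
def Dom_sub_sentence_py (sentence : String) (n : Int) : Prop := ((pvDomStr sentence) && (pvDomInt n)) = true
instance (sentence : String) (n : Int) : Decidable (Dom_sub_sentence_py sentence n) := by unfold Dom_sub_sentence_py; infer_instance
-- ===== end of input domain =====

-- B replaces A's n phase passes (one integer cursor per phase) by a single group-by pass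
-- over all valid window offsets, bucketing each joined window by offset % n in a dict and
-- flattening the buckets in insertion order; B skips A's Theta(n) empty phase iterations,
-- which a timing run measured faster for large n (objective: faster).

-- ===== PORT A =====
-- literal port: for each start in range(n), run (len-start)//n iterations, each appending
-- " ".join(sentence_list[next:next+n]) and advancing next by n.
def sub_sentence_py (sentence : String) (n : Int) : List String :=
  let sentence_list := (PySem.Str.split? sentence " ").getD []
  (PySem.List.pyRange 0 n 1).foldl
    (fun results start =>
      ((PySem.List.pyRange 0 (PySem.Int.floordiv ((sentence_list.length : Int) - start) n) 1).foldl
        (fun (st : List String × Int) _ =>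
          (st.1 ++ [PySem.Str.join " " (PySem.List.slice sentence_list (some st.2) (some (st.2 + n)))],
           st.2 + n))
        (results, start)).1)
    []

-- ===== PORT B =====
-- literal port of Source B: guard n <= 0, then one foldl over range(len(words)-n+1) building the
-- bucket dict (buckets.setdefault(r, []).append(x) is ported as Dict.modify r [] (· ++ [x]),
-- i.e. d[r] = d.get(r, []) + [x], exact for this observable state), then the flattening
-- comprehension over buckets.values().
def sub_sentence_py_alt (sentence : String) (n : Int) : List String :=
  let words := (PySem.Str.split? sentence " ").getD []
  if n ≤ 0 then []
  else
    let buckets :=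
      (PySem.List.pyRange 0 ((words.length : Int) - n + 1) 1).foldl
        (fun (d : PySem.Dict Int (List String)) j =>
          d.modify (PySem.Int.mod j n) []
            (· ++ [PySem.Str.join " " (PySem.List.slice words (some j) (some (j + n)))]))
        PySem.Dict.empty
    buckets.values.flatten

-- ===== PRECONDITION & SPEC =====
def Spec_sub_sentence_py (sentence : String) (n : Int) (out : List String) : Prop := out = sub_sentence_py_alt sentence n
instance (sentence : String) (n : Int) (out : List String) : Decidable (Spec_sub_sentence_py sentence n out) := by unfold Spec_sub_sentence_py; infer_instance

-- ===== CLAIM (what is proved, stated in full; the proofs are below) =====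
def Claim_equal_sub_sentence_py : Prop := ∀ (sentence : String) (n : Int), Dom_sub_sentence_py sentence n → Spec_sub_sentence_py sentence n (sub_sentence_py sentence n)

-- ===== LEMMAS AND PROOFS =====

-- the joined n-window of ws at Nat offset j
def pvChunk (ws : List String) (nn j : Nat) : String :=
  PySem.Str.join " " ((ws.drop j).take nn)

-- successive n-groups of ws, stopping at an incomplete group (A's inner loop, abstractly)
def pvGroups (nn : Nat) (ws : List String) : List String :=
  if _h : 0 < nn ∧ nn ≤ ws.length then
    PySem.Str.join " " (ws.take nn) :: pvGroups nn (ws.drop nn)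
  else []
termination_by ws.length
decreasing_by simp; omega

-- B's bucket for residue s: the chunks at offsets j < m with j % nn = s, in offset order
def pvBucket (ws : List String) (nn m s : Nat) : List String :=
  ((List.range m).filter (fun j => j % nn == s)).map (fun j => pvChunk ws nn j)

-- number of j < m with j % nn = s (for s < nn): ceil((m-s)/nn)
def pvCnt (nn s m : Nat) : Nat := (m - s + nn - 1) / nn

theorem pv_cnt_zero (nn s m : Nat) (hn : 0 < nn) (h : m ≤ s) : pvCnt nn s m = 0 := by
  unfold pvCnt
  have : m - s = 0 := by omega
  rw [this]
  exact Nat.div_eq_of_lt (by omega)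

-- PySem.Int.mod on nonneg casts is Nat %
theorem pv_mod_cast (j nn : Nat) : PySem.Int.mod (j : Int) (nn : Int) = ((j % nn : Nat) : Int) := by
  rw [PySem.Int.mod, Int.fmod_eq_emod]
  simp

-- A's inner loop, run for l.length iterations from cursor j, appends exactly the n-groups
-- of ws.drop j to the accumulator (when l.length = (ws.drop j).length / nn).
theorem pv_inner_eq {α : Type} (ws : List String) (nn : Nat) (hn : 0 < nn)
    (l : List α) (acc : List String) (j : Nat)
    (hl : l.length = (ws.drop j).length / nn) :
    (l.foldl
      (fun (st : List String × Int) _ =>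
        (st.1 ++ [PySem.Str.join " " (PySem.List.slice ws (some st.2) (some (st.2 + (nn : Int))))],
         st.2 + (nn : Int)))
      (acc, (j : Int))).1 = acc ++ pvGroups nn (ws.drop j) := by
  induction l generalizing acc j with
  | nil =>
    have hl0 : (ws.drop j).length / nn = 0 := by simpa using hl.symm
    have hlt : ¬ (0 < nn ∧ nn ≤ (ws.drop j).length) := by
      rintro ⟨-, h2⟩
      have h1 := (Nat.one_le_div_iff hn).2 h2
      omega
    rw [pvGroups, dif_neg hlt]
    simp
  | cons x t ih =>
    have hlen : nn ≤ (ws.drop j).length := by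
      by_contra h
      have h0 : (ws.drop j).length / nn = 0 := Nat.div_eq_of_lt (by omega)
      rw [h0] at hl
      simp at hl
    have hslice : PySem.List.slice ws (some (j : Int)) (some ((j : Int) + (nn : Int)))
        = (ws.drop j).take nn := PySem.List.slice_natCast_add ws j nn
    have hdrop : (ws.drop j).drop nn = ws.drop (j + nn) := by
      rw [List.drop_drop, Nat.add_comm]
    have hl' : t.length = (ws.drop (j + nn)).length / nn := by
      rw [← hdrop, List.length_drop]
      have h1 := Nat.div_eq_sub_div hn hlen
      simp only [List.length_cons] at hl
      omega
    rw [List.foldl_cons, hslice]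
    have hcast : ((j : Int) + (nn : Int)) = ((j + nn : Nat) : Int) := by omega
    rw [hcast]
    rw [ih (acc ++ [PySem.Str.join " " ((ws.drop j).take nn)]) (j + nn) hl']
    conv_rhs => rw [pvGroups]
    rw [dif_pos ⟨hn, hlen⟩, hdrop]
    simp

-- count: A's (len - start)//n equals the Nat group count (drop start).length / n.
theorem pv_count_eq (ws : List String) (nn : Nat) (hn : 0 < nn) (s : Nat) :
    (PySem.Int.floordiv ((ws.length : Int) - (s : Int)) (nn : Int)).toNat
      = (ws.drop s).length / nn := by
  by_cases hs : s ≤ ws.length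
  · have : (ws.length : Int) - (s : Int) = ((ws.length - s : Nat) : Int) := by omega
    rw [this, PySem.Int.floordiv_natCast, Int.toNat_natCast, List.length_drop]
  · have hneg : (ws.length : Int) - (s : Int) < 0 := by omega
    have hlt : PySem.Int.floordiv ((ws.length : Int) - (s : Int)) (nn : Int) < 0 := by
      have := (PySem.Int.floordiv_lt_iff_lt_mul (a := (ws.length : Int) - (s : Int))
        (b := (nn : Int)) (q := 0) (by exact_mod_cast hn)).2 (by omega)
      omega
    have hd : (ws.drop s).length = 0 := by simp; omega
    simp [hd]
    omega

-- a tail shorter than n yields no group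
theorem pv_groups_nil (nn : Nat) (ws : List String) (h : ws.length < nn) :
    pvGroups nn ws = [] := by
  rw [pvGroups, dif_neg]
  rintro ⟨-, h2⟩
  omega

-- pvGroups is the arithmetic progression of chunks s, s+nn, s+2nn, …
theorem pv_groups_eq_map (ws : List String) (nn : Nat) (hn : 0 < nn) (s : Nat) :
    pvGroups nn (ws.drop s)
      = (List.range ((ws.drop s).length / nn)).map (fun k => pvChunk ws nn (s + k * nn)) := by
  generalize hc : (ws.drop s).length / nn = c
  induction c generalizing s with
  | zero =>
    rw [List.range_zero, List.map_nil]
    apply pv_groups_nil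
    by_contra h
    have := (Nat.one_le_div_iff hn).2 (by omega : nn ≤ (ws.drop s).length)
    omega
  | succ c ih =>
    have hlen : nn ≤ (ws.drop s).length := by
      by_contra h
      rw [Nat.div_eq_of_lt (by omega)] at hc
      omega
    have hdrop : (ws.drop s).drop nn = ws.drop (s + nn) := by
      rw [List.drop_drop, Nat.add_comm]
    have hc' : (ws.drop (s + nn)).length / nn = c := by
      rw [← hdrop, List.length_drop]
      have := Nat.div_eq_sub_div hn hlen
      omega
    rw [pvGroups, dif_pos ⟨hn, hlen⟩, hdrop, ih (s + nn) hc']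
    rw [List.range_succ_eq_map, List.map_cons, List.map_map]
    refine congrArg₂ List.cons ?_ (List.map_congr_left fun k _ => ?_)
    · simp [pvChunk]
    · simp only [Function.comp_apply, Nat.succ_eq_add_one]
      have harg : s + nn + k * nn = s + (k + 1) * nn := by ring
      rw [harg]

-- the offsets j < m with j % nn = s are the progression s, s+nn, … of length pvCnt nn s m
theorem pv_filter_range (nn s : Nat) (hn : 0 < nn) (hs : s < nn) (m : Nat) :
    (List.range m).filter (fun j => j % nn == s)
      = (List.range (pvCnt nn s m)).map (fun k => s + k * nn) := by
  induction m with
  | zero => rw [pv_cnt_zero nn s 0 hn (by omega)]; rfl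
  | succ m ih =>
    rw [List.range_succ, List.filter_append, ih]
    have hdm := Nat.div_add_mod m nn
    obtain ⟨p, hp⟩ : ∃ p, nn * (m / nn) = p := ⟨_, rfl⟩
    rw [hp] at hdm
    by_cases h : m % nn = s
    · have hcm : pvCnt nn s m = m / nn := by
        unfold pvCnt
        have h1 : m - s + nn - 1 = nn * (m / nn) + (nn - 1) := by rw [hp]; omega
        rw [h1, Nat.mul_add_div hn, Nat.div_eq_of_lt (show nn - 1 < nn by omega), Nat.add_zero]
      have hcm1 : pvCnt nn s (m + 1) = m / nn + 1 := by
        unfold pvCnt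
        have h1 : m + 1 - s + nn - 1 = nn * (m / nn + 1) := by
          rw [Nat.mul_succ, hp]; omega
        rw [h1, Nat.mul_div_cancel_left _ hn]
      have hlast : s + (m / nn) * nn = m := by rw [Nat.mul_comm, hp]; omega
      rw [hcm1, hcm, List.range_succ, List.map_append]
      simp [h, hlast]
    · have hc : pvCnt nn s (m + 1) = pvCnt nn s m := by
        by_cases hms : m ≤ s
        · have hlt : m < s := by
            rcases Nat.lt_or_ge m nn with h1 | h1
            · have := Nat.mod_eq_of_lt h1
              omega
            · omega
          rw [pv_cnt_zero nn s (m+1) hn (by omega), pv_cnt_zero nn s m hn (by omega)]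
        · have hsm : s < m := by omega
          have hdm2 := Nat.div_add_mod (m - s) nn
          obtain ⟨q2, hq2⟩ : ∃ q2, nn * ((m - s) / nn) = q2 := ⟨_, rfl⟩
          rw [hq2] at hdm2
          have hrlt : (m - s) % nn < nn := Nat.mod_lt _ hn
          have hr0 : (m - s) % nn ≠ 0 := by
            intro h0
            apply h
            have hm : m = s + nn * ((m - s) / nn) := by rw [hq2]; omega
            rw [hm, Nat.add_mul_mod_self_left, Nat.mod_eq_of_lt hs]
          have e1 : m - s + nn - 1 = nn * ((m - s) / nn) + ((m - s) % nn + nn - 1) := by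
            rw [hq2]; omega
          have e2 : m + 1 - s + nn - 1 = nn * ((m - s) / nn) + ((m - s) % nn + nn) := by
            rw [hq2]; omega
          unfold pvCnt
          rw [e1, e2, Nat.mul_add_div hn, Nat.mul_add_div hn]
          have d1 : ((m - s) % nn + nn - 1) / nn = 1 := by
            rw [Nat.div_eq_sub_div hn (by omega), Nat.div_eq_of_lt (by omega)]
          have d2 : ((m - s) % nn + nn) / nn = 1 := by
            rw [Nat.div_eq_sub_div hn (by omega), Nat.div_eq_of_lt (by omega)]
          rw [d1, d2]
      rw [hc]
      simp [h]

-- B's per-residue bucket is exactly A's per-phase group list.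
theorem pv_bucket_eq_groups (ws : List String) (nn : Nat) (hn : 0 < nn) (s : Nat) (hs : s < nn) :
    pvBucket ws nn (ws.length + 1 - nn) s = pvGroups nn (ws.drop s) := by
  rw [pvBucket, pv_filter_range nn s hn hs, List.map_map,
    pv_groups_eq_map ws nn hn s, List.length_drop]
  have hcnt : pvCnt nn s (ws.length + 1 - nn) = (ws.length - s) / nn := by
    by_cases h1 : nn ≤ ws.length + 1 ∧ s ≤ ws.length + 1 - nn
    · unfold pvCnt
      congr 1
      omega
    · have hz : ws.length - s < nn := by omega
      rw [pv_cnt_zero nn s _ hn (by omega), Nat.div_eq_of_lt hz]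
  rw [hcnt]
  rfl

-- the key list of B's dict loop: residues of 0..m-1 dedup to 0..min nn m - 1 (as Ints)
theorem pv_ofList_mod (nn : Nat) (hn : 0 < nn) (m : Nat) :
    PySem.Set.ofList ((List.range m).map (fun j => ((j % nn : Nat) : Int)))
      = (List.range (min nn m)).map (fun s : Nat => (s : Int)) := by
  induction m with
  | zero => simp [PySem.Set.ofList]
  | succ m ih =>
    rw [List.range_succ, List.map_append, PySem.Set.ofList_eq_foldl, List.foldl_append,
      ← PySem.Set.ofList_eq_foldl, ih]
    show PySem.Set.add _ _ = _
    by_cases h : m < nn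
    · have hmod : m % nn = m := Nat.mod_eq_of_lt h
      have hmin : min nn m = m := by omega
      rw [PySem.Set.add, if_neg (by
        simp only [hmod, PySem.Set.contains]
        intro hc
        simp at hc)]
      have hmin1 : min nn (m + 1) = m + 1 := by omega
      simp only [hmod, hmin, hmin1, List.range_succ, List.map_append]
      rfl
    · have hmem : (((m % nn : Nat) : Int)) ∈ (List.range (min nn m)).map (fun s : Nat => (s : Int)) := by
        refine List.mem_map.2 ⟨m % nn, ?_, rfl⟩
        rw [List.mem_range]
        have := Nat.mod_lt m hn
        omega
      rw [PySem.Set.add, if_pos (by simpa using hmem)]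
      have : min nn (m + 1) = min nn m := by omega
      rw [this]

-- Bool-level: equality of Nat casts into Int is Nat equality
theorem pv_beq_cast (a b : Nat) : (((a : Int)) == ((b : Int))) = (a == b) := by
  by_cases h : a = b <;> simp [h]

-- A is the flatMap, over phases 0..n-1, of the n-groups of the phase's tail.
theorem pv_a_eq (sentence : String) (n : Int) (hn : 0 < n) :
    sub_sentence_py sentence n
      = (List.range n.toNat).flatMap
          (fun s => pvGroups n.toNat (((PySem.Str.split? sentence " ").getD []).drop s)) := by
  unfold sub_sentence_py
  set ws := (PySem.Str.split? sentence " ").getD [] with hws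
  rw [PySem.List.foldl_congr_mem
    (g := fun (results : List String) (start : Int) =>
      results ++ pvGroups n.toNat (PySem.List.slice ws (some start) none))]
  · rw [PySem.List.foldl_append_eq_flatMap, PySem.List.pyRange_one, List.flatMap_map]
    have hdrop : ∀ k : Nat, PySem.List.slice ws (some ((0 : Int) + (k : Int))) none = ws.drop k := by
      intro k
      rw [PySem.List.slice_from ws (by positivity)]
      simp
    simp only [hdrop, Int.sub_zero]
    simp
  · intro acc start hmem
    have hsr := (PySem.List.mem_pyRange_one).1 hmem
    obtain ⟨s, rfl⟩ : ∃ s : Nat, start = (s : Int) := ⟨start.toNat, by omega⟩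
    have hnn : 0 < n.toNat := by omega
    have hslice : PySem.List.slice ws (some (s : Int)) none = ws.drop s := by
      rw [PySem.List.slice_from ws (a := (s : Int)) (by omega)]; simp
    rw [hslice]
    have hcount := pv_count_eq ws n.toNat hnn s
    have hcast : (n.toNat : Int) = n := by omega
    have hlen : (PySem.List.pyRange 0 (PySem.Int.floordiv ((ws.length : Int) - (s : Int)) n) 1).length
        = (ws.drop s).length / n.toNat := by
      rw [PySem.List.length_pyRange_one]
      rw [← hcast] at hcount ⊢
      simpa using hcount
    have := pv_inner_eq (α := Int) ws n.toNat hnn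
      (PySem.List.pyRange 0 (PySem.Int.floordiv ((ws.length : Int) - (s : Int)) n) 1)
      acc s hlen
    rw [hcast] at this
    exact this

-- B is the flatMap, over the residues actually seen, of the per-residue buckets.
theorem pv_b_eq (sentence : String) (n : Int) (hn : 0 < n) :
    sub_sentence_py_alt sentence n
      = (List.range (min n.toNat ((((PySem.Str.split? sentence " ").getD []).length : Int) - n + 1).toNat)).flatMap
          (fun s => pvBucket ((PySem.Str.split? sentence " ").getD []) n.toNat
            ((((PySem.Str.split? sentence " ").getD []).length : Int) - n + 1).toNat s) := by
  unfold sub_sentence_py_alt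
  set ws := (PySem.Str.split? sentence " ").getD [] with hws
  rw [if_neg (by omega)]
  have hcast : (n.toNat : Int) = n := by omega
  set nn := n.toNat with hnn
  set M : Int := (ws.length : Int) - n + 1 with hM
  set m := M.toNat with hm
  have hrange : PySem.List.pyRange 0 M 1 = (List.range m).map (fun k : Nat => (k : Int)) := by
    rw [PySem.List.pyRange_one]
    simp only [Int.sub_zero, zero_add]
    rw [← hm]
  have hkeymap : ((List.range m).map (fun k : Nat => (k : Int))).map (fun j => PySem.Int.mod j n)
      = (List.range m).map (fun j => ((j % nn : Nat) : Int)) := by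
    rw [List.map_map]
    refine List.map_congr_left fun j _ => ?_
    simp only [Function.comp_apply]
    rw [← hcast, pv_mod_cast]
  -- keys of the bucket dict
  have hkeys : (((List.range m).map (fun k : Nat => (k : Int))).foldl
      (fun (d : PySem.Dict Int (List String)) j =>
        d.modify (PySem.Int.mod j n) []
          (· ++ [PySem.Str.join " " (PySem.List.slice ws (some j) (some (j + n)))]))
      PySem.Dict.empty).keys = (List.range (min nn m)).map (fun s : Nat => (s : Int)) := by
    rw [PySem.Dict.keys_foldl_modify_key _ (fun j => PySem.Int.mod j n) []
      (fun _ j => (· ++ [PySem.Str.join " " (PySem.List.slice ws (some j) (some (j + n)))]))]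
    rw [PySem.Dict.keys_empty]
    show PySem.Set.ofList _ = _
    rw [hkeymap, pv_ofList_mod nn (by omega) m]
  have hnodup : (((List.range m).map (fun k : Nat => (k : Int))).foldl
      (fun (d : PySem.Dict Int (List String)) j =>
        d.modify (PySem.Int.mod j n) []
          (· ++ [PySem.Str.join " " (PySem.List.slice ws (some j) (some (j + n)))]))
      PySem.Dict.empty).keys.Nodup := by
    apply PySem.Dict.nodup_keys_foldl_modify_key _
      (fun j => PySem.Int.mod j n) []
      (fun _ j => (· ++ [PySem.Str.join " " (PySem.List.slice ws (some j) (some (j + n)))]))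
    simp [PySem.Dict.keys_empty]
  rw [hrange]
  show (((List.range m).map (fun k : Nat => (k : Int))).foldl
      (fun (d : PySem.Dict Int (List String)) j =>
        d.modify (PySem.Int.mod j n) []
          (· ++ [PySem.Str.join " " (PySem.List.slice ws (some j) (some (j + n)))]))
      PySem.Dict.empty).values.flatten = _
  rw [PySem.Dict.values_eq_map_keys _ hnodup []]
  rw [hkeys, ← List.flatMap_def, List.flatMap_map]
  refine List.flatMap_congr fun s hs => ?_
  -- s is a residue actually seen: compute its bucket via getD_foldl_modify_append
  have hD : ((List.range m).map (fun k : Nat => (k : Int))).foldl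
      (fun (d : PySem.Dict Int (List String)) j =>
        d.modify (PySem.Int.mod j n) []
          (· ++ [PySem.Str.join " " (PySem.List.slice ws (some j) (some (j + n)))]))
      PySem.Dict.empty
      = ((((List.range m).map (fun k : Nat => (k : Int))).map
            (fun j => (PySem.Int.mod j n,
              PySem.Str.join " " (PySem.List.slice ws (some j) (some (j + n)))))).foldl
          (fun (d : PySem.Dict Int (List String)) p => d.modify p.1 [] (· ++ [p.2]))
          PySem.Dict.empty) := by
    simp only [List.foldl_map]
  rw [hD, PySem.Dict.getD_foldl_modify_append]
  simp only [List.filter_map, List.map_map, PySem.Dict.getD_empty, List.nil_append]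
  unfold pvBucket
  have hfilter : ∀ (P : Nat → Bool), (∀ j, P j = (j % nn == s)) →
      (List.range m).filter P = (List.range m).filter (fun j => j % nn == s) :=
    fun P hP => List.filter_congr fun j _ => by rw [hP]
  rw [hfilter _ (fun j => by
    simp only [Function.comp_apply]
    rw [← hcast, pv_mod_cast, pv_beq_cast])]
  refine List.map_congr_left fun j hj => ?_
  simp only [Function.comp_apply]
  rw [show ((j : Int) + n) = ((j : Int) + ((nn : Nat) : Int)) by rw [hcast],
    PySem.List.slice_natCast_add]
  rfl

-- A = B: split A's phase range at min n m; the late phases are empty, the early ones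
-- are exactly B's buckets.
theorem pv_main (sentence : String) (n : Int) :
    sub_sentence_py sentence n = sub_sentence_py_alt sentence n := by
  by_cases hn : n ≤ 0
  · unfold sub_sentence_py sub_sentence_py_alt
    rw [PySem.List.pyRange_one_eq_nil (by omega : n ≤ (0 : Int))]
    simp [hn]
  · have hn' : 0 < n := by omega
    rw [pv_a_eq sentence n hn', pv_b_eq sentence n hn']
    set ws := (PySem.Str.split? sentence " ").getD [] with hws
    have hcast : (n.toNat : Int) = n := by omega
    set nn := n.toNat with hnn
    have hmEq : ((ws.length : Int) - n + 1).toNat = ws.length + 1 - nn := by omega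
    rw [hmEq]
    set m := ws.length + 1 - nn with hm
    set r := min nn m with hr
    rw [show List.range nn = List.range r ++ (List.range (nn - r)).map (fun x => r + x) by
      rw [← List.range_add]; congr 1; omega]
    rw [List.flatMap_append]
    have hextra : ((List.range (nn - r)).map (fun x => r + x)).flatMap
        (fun s => pvGroups nn (ws.drop s)) = [] := by
      rw [List.flatMap_map]
      refine List.flatMap_eq_nil_iff.2 fun x hx => ?_
      rw [List.mem_range] at hx
      apply pv_groups_nil
      rw [List.length_drop]
      omega
    rw [hextra, List.append_nil]
    refine List.flatMap_congr fun s hs => ?_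
    rw [List.mem_range] at hs
    exact (pv_bucket_eq_groups ws nn (by omega) s (by omega)).symm

-- ===== VERDICT (by name: the statement is the Claim_ definition above) =====
theorem sub_sentence_py_spec : Claim_equal_sub_sentence_py := by
  intro sentence n _
  unfold Spec_sub_sentence_py
  exact pv_main sentence n
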